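-- pv_equiv track=rewrite | github.com/minaph/Linc_Analyzer | Linc解析.py | halfletters
-- ===== SOURCE A (Python) =====
-- def halfletters(strings):
--     ch = ""
--     for ch in strings:
--         if ch.encode("utf-8").isalnum() or ch == " " or ch == "-" or ch == "'" or ch == "~" or ch == ",":
--             continue
--         else:
--             return False
--     return True
-- ===== SOURCE B (Python) =====
-- import re
--
-- _PATTERN = re.compile(r"[0-9A-Za-z \-'~,]*\Z")
--
--
-- def halfletters(strings):
--     return _PATTERN.match(strings) is not None
-- ===== Notes on version B (the rewrite author's own statement) =====
-- stated objective: idiomatic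
-- what changed: Replaced the explicit per-character loop with early return (per-char encode().isalnum() tests) by a single regex full-match of the whole string against the allowed character class; the regex engine's C-level scan removes the per-character Python bytecode and encode() calls.
import Mathlib
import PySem

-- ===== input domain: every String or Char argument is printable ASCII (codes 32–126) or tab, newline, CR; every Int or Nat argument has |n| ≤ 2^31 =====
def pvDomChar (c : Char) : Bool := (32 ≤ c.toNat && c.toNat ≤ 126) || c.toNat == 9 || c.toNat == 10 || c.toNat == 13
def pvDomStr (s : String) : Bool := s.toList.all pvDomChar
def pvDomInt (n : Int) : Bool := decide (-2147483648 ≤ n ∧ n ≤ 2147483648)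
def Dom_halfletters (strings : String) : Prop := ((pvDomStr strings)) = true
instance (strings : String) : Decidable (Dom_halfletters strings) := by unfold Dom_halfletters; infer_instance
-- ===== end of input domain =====

-- ===== PORT A =====
-- B replaces the per-character loop with early return by one regex full-match of the whole
-- string against the allowed character class (objective: idiomatic).
-- A's `ch.encode("utf-8").isalnum()` is ported as PySem.Chars.isalnum, exact on the ASCII domain.
def halflettersLoop : List Char → Bool
  | [] => true
  | ch :: rest =>
    if PySem.Chars.isalnum ch || ch == ' ' || ch == '-' || ch == '\'' || ch == '~' || ch == ',' then
      halflettersLoop rest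
    else
      false

def halfletters (strings : String) : Bool :=
  halflettersLoop strings.toList

-- ===== PORT B =====
-- The regex character class [0-9A-Za-z \-'~,], transliterated bracket item by bracket item:
-- three ranges and five literal characters.
def pvInClass (c : Char) : Bool :=
  ('0' ≤ c && c ≤ '9') || ('A' ≤ c && c ≤ 'Z') || ('a' ≤ c && c ≤ 'z') ||
  c == ' ' || c == '-' || c == '\'' || c == '~' || c == ','

-- `_PATTERN.match(strings) is not None` for the anchored pattern [C]*\Z: the whole string
-- matches exactly when every character lies in the class C. This equivalence is exact for a
-- pattern of this shape (Kleene star of a one-character class).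
def halfletters_alt (strings : String) : Bool :=
  strings.toList.all pvInClass

-- ===== PRECONDITION & SPEC =====
def Spec_halfletters (strings : String) (out : Bool) : Prop := out = halfletters_alt strings
instance (strings : String) (out : Bool) : Decidable (Spec_halfletters strings out) := by unfold Spec_halfletters; infer_instance

-- ===== CLAIM (what is proved, stated in full; the proofs are below) =====
def Claim_equal_halfletters : Prop := ∀ (strings : String), Dom_halfletters strings → Spec_halfletters strings (halfletters strings)

-- ===== LEMMAS AND PROOFS =====
def pvAllowedChar (ch : Char) : Bool :=
  PySem.Chars.isalnum ch || ch == ' ' || ch == '-' || ch == '\'' || ch == '~' || ch == ','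

theorem halflettersLoop_eq_all (cs : List Char) : halflettersLoop cs = cs.all pvAllowedChar := by
  induction cs with
  | nil => rfl
  | cons c rest ih =>
    simp only [halflettersLoop, List.all_cons, pvAllowedChar]
    by_cases h : (PySem.Chars.isalnum c || c == ' ' || c == '-' || c == '\'' || c == '~' || c == ',') = true
    · simp [h, ih]
    · simp [Bool.not_eq_true] at h
      simp [h]

set_option maxRecDepth 8192 in
theorem pvKey : ∀ n : Fin 127, pvAllowedChar (Char.ofNat n.val) = pvInClass (Char.ofNat n.val) := by decide

theorem pvKeyChar (c : Char) (h : c.toNat ≤ 126) : pvAllowedChar c = pvInClass c := by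
  have := pvKey ⟨c.toNat, by omega⟩
  rwa [Char.ofNat_toNat] at this

-- ===== VERDICT (by name: the statement is the Claim_ definition above) =====
theorem halfletters_spec : Claim_equal_halfletters := by
  intro s hdom
  unfold Spec_halfletters halfletters halfletters_alt
  rw [halflettersLoop_eq_all]
  unfold Dom_halfletters pvDomStr at hdom
  rw [List.all_eq_true] at hdom
  rw [Bool.eq_iff_iff, List.all_eq_true, List.all_eq_true]
  apply forall_congr'
  intro c
  apply imp_congr_right
  intro hc
  have h126 : c.toNat ≤ 126 := by
    have := hdom c hc
    simp [pvDomChar] at this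
    omega
  rw [pvKeyChar c h126]
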